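-- pv_equiv track=rewrite | github.com/HongqingThomas/CS598-advanced-robotics-final | final/prompt2_part2.py | narrow_pattern
-- ===== SOURCE A (Python) =====
-- def narrow_pattern(map_size, obstacle):
--     narrow_upper = []
--     narrow_lower = []
--     narrow_left = []
--     narrow_right = []
--     narrow_total = []
--     for i in range(map_size[0]-3):
--         for j in range(map_size[1]):
--             if ([i, j] in obstacle) and ([i+1, j] not in obstacle) and ([i+3, j] in obstacle):
--                 narrow_upper.append([i+1, j])
--                 narrow_lower.append([i+2, j])
--                 narrow_total.append([i + 1, j])
--                 narrow_total.append([i + 2, j])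
--     for i in range(map_size[0]):
--         for j in range(map_size[1]-3):
--             if ([i, j] in obstacle) and ([i, j+1] not in obstacle) and ([i, j+3] in obstacle):
--                 narrow_left.append([i, j+1])
--                 narrow_right.append([i, j+2])
--                 narrow_total.append([i, j+1])
--                 narrow_total.append([i, j+2])
--     if narrow_right != []:
--         return narrow_left, narrow_right, narrow_total
--     if narrow_upper != []:
--         return narrow_upper, narrow_lower, narrow_total
--     return None
-- ===== SOURCE B (Python) =====
-- def narrow_pattern(map_size, obstacle):
--     h, w = map_size[0], map_size[1]
--     obs = {(r[0], r[1]) for r in obstacle if len(r) == 2}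
--     vert = sorted((i, j) for (i, j) in obs
--                   if 0 <= i < h - 3 and 0 <= j < w
--                   and (i + 3, j) in obs and (i + 1, j) not in obs)
--     horiz = sorted((i, j) for (i, j) in obs
--                    if 0 <= i < h and 0 <= j < w - 3
--                    and (i, j + 3) in obs and (i, j + 1) not in obs)
--     upper = [[i + 1, j] for i, j in vert]
--     lower = [[i + 2, j] for i, j in vert]
--     left = [[i, j + 1] for i, j in horiz]
--     right = [[i, j + 2] for i, j in horiz]
--     total = [c for i, j in vert for c in ([i + 1, j], [i + 2, j])] \
--           + [c for i, j in horiz for c in ([i, j + 1], [i, j + 2])]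
--     if right:
--         return left, right, total
--     if upper:
--         return upper, lower, total
--     return None
-- ===== Notes on version B (the rewrite author's own statement) =====
-- stated objective: faster
-- what changed: B replaces A's scan of every grid cell with three O(len(obstacle)) list-membership tests each by one pass over a deduplicating set of obstacle cells with O(1) membership tests, followed by a lexicographic sort of the matches to restore A's row-major output order.
-- outside the precondition, e.g. on narrow_pattern([0], []): A returns None, B raises IndexError
import Mathlib
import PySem

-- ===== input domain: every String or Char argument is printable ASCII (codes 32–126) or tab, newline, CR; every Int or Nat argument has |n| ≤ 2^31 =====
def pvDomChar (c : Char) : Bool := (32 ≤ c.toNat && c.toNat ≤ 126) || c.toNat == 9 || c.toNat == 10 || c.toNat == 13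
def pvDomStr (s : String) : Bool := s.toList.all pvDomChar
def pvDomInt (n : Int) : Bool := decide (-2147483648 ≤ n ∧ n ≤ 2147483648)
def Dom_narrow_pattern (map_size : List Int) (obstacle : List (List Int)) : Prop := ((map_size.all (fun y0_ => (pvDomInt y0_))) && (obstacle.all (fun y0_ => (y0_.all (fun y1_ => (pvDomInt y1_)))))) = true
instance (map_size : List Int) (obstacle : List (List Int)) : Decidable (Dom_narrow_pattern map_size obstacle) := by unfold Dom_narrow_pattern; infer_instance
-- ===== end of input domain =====

-- B replaces A's full-grid double scan with quadratic list membership by one pass over a set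
-- of obstacle cells plus a lex sort of the matches (objective: faster).

-- ===== PORT A =====
-- '[i, j] in obstacle' / 'not in obstacle'
def aCondV (ob : List (List Int)) (i j : Int) : Bool :=
  ob.contains [i, j] && !ob.contains [i + 1, j] && ob.contains [i + 3, j]
def aCondH (ob : List (List Int)) (i j : Int) : Bool :=
  ob.contains [i, j] && !ob.contains [i, j + 1] && ob.contains [i, j + 3]

def narrow_pattern (map_size : List Int) (obstacle : List (List Int)) :
    Option (List (List Int) × List (List Int) × List (List Int)) :=
  let h := PySem.List.pyGetD map_size 0 0
  let w := PySem.List.pyGetD map_size 1 0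
  -- first double loop: narrow_upper × narrow_lower × narrow_total
  let s1 := (PySem.List.pyRange 0 (h - 3) 1).foldl (fun st i =>
      (PySem.List.pyRange 0 w 1).foldl (fun st j =>
        if aCondV obstacle i j then
          (st.1 ++ [[i + 1, j]], st.2.1 ++ [[i + 2, j]], st.2.2 ++ [[i + 1, j], [i + 2, j]])
        else st) st) ([], [], [])
  -- second double loop: narrow_left × narrow_right × narrow_total (continuing s1's total)
  let s2 := (PySem.List.pyRange 0 h 1).foldl (fun st i =>
      (PySem.List.pyRange 0 (w - 3) 1).foldl (fun st j =>
        if aCondH obstacle i j then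
          (st.1 ++ [[i, j + 1]], st.2.1 ++ [[i, j + 2]], st.2.2 ++ [[i, j + 1], [i, j + 2]])
        else st) st) ([], [], s1.2.2)
  if s2.2.1 ≠ [] then some (s2.1, s2.2.1, s2.2.2)
  else if s1.1 ≠ [] then some (s1.1, s1.2.1, s2.2.2)
  else none

-- ===== PORT B =====
-- {(r[0], r[1]) for r in obstacle if len(r) == 2}
def altObs (obstacle : List (List Int)) : List (Int × Int) :=
  PySem.Set.ofList ((obstacle.filter (fun r => r.length == 2)).map (fun r => (r.getD 0 0, r.getD 1 0)))

def altCondV (h w : Int) (obs : List (Int × Int)) (p : Int × Int) : Bool :=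
  decide (0 ≤ p.1) && decide (p.1 < h - 3) && decide (0 ≤ p.2) && decide (p.2 < w)
    && obs.contains (p.1 + 3, p.2) && !obs.contains (p.1 + 1, p.2)
def altCondH (h w : Int) (obs : List (Int × Int)) (p : Int × Int) : Bool :=
  decide (0 ≤ p.1) && decide (p.1 < h) && decide (0 ≤ p.2) && decide (p.2 < w - 3)
    && obs.contains (p.1, p.2 + 3) && !obs.contains (p.1, p.2 + 1)

def narrow_pattern_alt (map_size : List Int) (obstacle : List (List Int)) :
    Option (List (List Int) × List (List Int) × List (List Int)) :=
  let h := PySem.List.pyGetD map_size 0 0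
  let w := PySem.List.pyGetD map_size 1 0
  let obs := altObs obstacle
  let vert := PySem.List.sorted2 (obs.filter (altCondV h w obs)) Prod.fst Prod.snd
  let horiz := PySem.List.sorted2 (obs.filter (altCondH h w obs)) Prod.fst Prod.snd
  let upper := vert.map (fun p => [p.1 + 1, p.2])
  let lower := vert.map (fun p => [p.1 + 2, p.2])
  let left := horiz.map (fun p => [p.1, p.2 + 1])
  let right := horiz.map (fun p => [p.1, p.2 + 2])
  let total := vert.flatMap (fun p => [[p.1 + 1, p.2], [p.1 + 2, p.2]])
      ++ horiz.flatMap (fun p => [[p.1, p.2 + 1], [p.1, p.2 + 2]])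
  if right ≠ [] then some (left, right, total)
  else if upper ≠ [] then some (upper, lower, total)
  else none

-- ===== PRECONDITION & SPEC =====
-- Python A indexes map_size[0] and map_size[1]; with fewer than two entries it raises
-- IndexError (except in the degenerate case map_size = [n], n ≤ 0, where the loops never
-- run and A returns None while B still reads map_size[1] and raises — excluded here).
def Pre_narrow_pattern (map_size : List Int) (obstacle : List (List Int)) : Prop :=
  2 ≤ map_size.length
instance (map_size : List Int) (obstacle : List (List Int)) : Decidable (Pre_narrow_pattern map_size obstacle) := by unfold Pre_narrow_pattern; infer_instance
def pvWitness_narrow_pattern : List Int × List (List Int) :=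
  ([5, 3], [[0, 0], [3, 0], [1, 1], [0, 2]])
def Spec_narrow_pattern (map_size : List Int) (obstacle : List (List Int)) (out : Option (List (List Int) × List (List Int) × List (List Int))) : Prop := out = narrow_pattern_alt map_size obstacle
instance (map_size : List Int) (obstacle : List (List Int)) (out : Option (List (List Int) × List (List Int) × List (List Int))) : Decidable (Spec_narrow_pattern map_size obstacle out) := by unfold Spec_narrow_pattern; infer_instance

-- ===== CLAIM (what is proved, stated in full; the proofs are below) =====
def Claim_equal_narrow_pattern : Prop := ∀ (map_size : List Int) (obstacle : List (List Int)), Dom_narrow_pattern map_size obstacle → Pre_narrow_pattern map_size obstacle → Spec_narrow_pattern map_size obstacle (narrow_pattern map_size obstacle)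

-- ===== LEMMAS AND PROOFS =====

-- strict lexicographic order on cells: the order of Python's sorted on int pairs
def LexLt (a b : Int × Int) : Prop := a.1 < b.1 ∨ (a.1 = b.1 ∧ a.2 < b.2)

-- the Bool comparison sorted2 uses, specialised to fst/snd keys
def bef (a b : Int × Int) : Bool :=
  decide (a.1 < b.1) || (!decide (b.1 < a.1) && decide (a.2 < b.2))

theorem bef_iff (a b : Int × Int) : bef a b = true ↔ LexLt a b := by
  simp [bef, LexLt]; omega

theorem LexLt_trans {a b c : Int × Int} (h1 : LexLt a b) (h2 : LexLt b c) : LexLt a c := by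
  rcases h1 with h | ⟨h, h'⟩ <;> rcases h2 with g | ⟨g, g'⟩ <;> unfold LexLt <;> omega

theorem LexLt_of_not {a b : Int × Int} (h : ¬ LexLt a b) (hne : a ≠ b) : LexLt b a := by
  have : a.1 ≠ b.1 ∨ a.2 ≠ b.2 := by
    by_contra hc
    push Not at hc
    exact hne (Prod.ext hc.1 hc.2)
  unfold LexLt at *; omega

theorem insertBy_pairwise (x : Int × Int) (ys : List (Int × Int))
    (h : ys.Pairwise LexLt) (hx : x ∉ ys) :
    (PySem.List.insertBy bef x ys).Pairwise LexLt := by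
  induction ys with
  | nil => simp [PySem.List.insertBy]
  | cons y ys ih =>
    rw [show PySem.List.insertBy bef x (y :: ys)
        = if bef x y then x :: y :: ys else y :: PySem.List.insertBy bef x ys from rfl]
    rcases List.pairwise_cons.mp h with ⟨hy, hys⟩
    by_cases hb : bef x y = true
    · simp only [hb, if_true]
      have hxy : LexLt x y := (bef_iff x y).mp hb
      refine List.pairwise_cons.mpr ⟨?_, h⟩
      intro z hz
      rcases List.mem_cons.mp hz with rfl | hz
      · exact hxy
      · exact LexLt_trans hxy (hy z hz)
    · simp only [hb]
      have hxney : x ≠ y := fun he => hx (by simp [he])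
      have hyx : LexLt y x := LexLt_of_not (fun hl => hb ((bef_iff x y).mpr hl)) hxney
      refine List.pairwise_cons.mpr ⟨?_, ih hys (fun hm => hx (by simp [hm]))⟩
      intro z hz
      rcases (PySem.List.mem_insertBy bef x z ys).mp hz with rfl | hz
      · exact hyx
      · exact hy z hz

theorem foldl_insertBy_pairwise :
    ∀ (L acc : List (Int × Int)), L.Nodup → acc.Pairwise LexLt → (∀ a ∈ acc, a ∉ L) →
    (L.foldl (fun acc x => PySem.List.insertBy bef x acc) acc).Pairwise LexLt := by
  intro L
  induction L with
  | nil => intro acc _ h _; simpa using h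
  | cons x L ih =>
    intro acc hnd hacc hdisj
    rcases List.nodup_cons.mp hnd with ⟨hxL, hndL⟩
    simp only [List.foldl_cons]
    refine ih _ hndL (insertBy_pairwise x acc hacc ?_) ?_
    · intro hxacc; exact hdisj x hxacc (List.mem_cons_self)
    · intro a ha
      rcases (PySem.List.mem_insertBy bef x a acc).mp ha with rfl | ha
      · exact hxL
      · exact fun hmem => hdisj a ha (List.mem_cons_of_mem _ hmem)

theorem sorted2_eq_of_perm (xs ys : List (Int × Int)) (hnd : xs.Nodup)
    (hp : ys.Perm xs) (hs : ys.Pairwise LexLt) :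
    PySem.List.sorted2 xs Prod.fst Prod.snd = ys := by
  have hdef : PySem.List.sorted2 xs Prod.fst Prod.snd
      = xs.foldl (fun acc x => PySem.List.insertBy bef x acc) [] := rfl
  have hpw : (PySem.List.sorted2 xs Prod.fst Prod.snd).Pairwise LexLt := by
    rw [hdef]
    exact foldl_insertBy_pairwise xs [] hnd (by simp) (by simp)
  have hperm : (PySem.List.sorted2 xs Prod.fst Prod.snd).Perm ys :=
    (PySem.List.sorted2_perm xs Prod.fst Prod.snd false).trans hp.symm
  exact List.eq_of_perm_of_sorted
    (fun a b _ _ hab hba => by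
      rcases hab with h | ⟨h, h'⟩ <;> rcases hba with g | ⟨g, g'⟩ <;>
        exact Prod.ext (by omega) (by omega))
    hpw hs hperm

-- the cells of the grid scan, in A's row-major visit order
def grid (h w : Int) (p : Int → Int → Bool) : List (Int × Int) :=
  (PySem.List.pyRange 0 h 1).flatMap
    (fun i => ((PySem.List.pyRange 0 w 1).filter (p i)).map (fun j => (i, j)))

theorem mem_grid (h w : Int) (p : Int → Int → Bool) (a b : Int) :
    (a, b) ∈ grid h w p ↔ (0 ≤ a ∧ a < h) ∧ (0 ≤ b ∧ b < w) ∧ p a b = true := by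
  simp only [grid, List.mem_flatMap, List.mem_map, List.mem_filter,
    PySem.List.mem_pyRange_one, Prod.mk.injEq]
  constructor
  · rintro ⟨i, hi, j, ⟨hj, hp⟩, rfl, rfl⟩
    exact ⟨hi, hj, hp⟩
  · rintro ⟨ha, hb, hp⟩
    exact ⟨a, ha, b, ⟨hb, hp⟩, rfl, rfl⟩

theorem grid_pairwise (h w : Int) (p : Int → Int → Bool) : (grid h w p).Pairwise LexLt := by
  rw [grid, List.pairwise_flatMap]
  constructor
  · intro i _
    rw [List.pairwise_map]
    exact ((PySem.List.pairwise_lt_pyRange_one 0 w).filter (p i)).imp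
      (fun hlt => Or.inr ⟨rfl, hlt⟩)
  · exact (PySem.List.pairwise_lt_pyRange_one 0 h).imp
      (fun hlt => by
        rintro x hx y hy
        simp only [List.mem_map] at hx hy
        rcases hx with ⟨jx, _, rfl⟩
        rcases hy with ⟨jy, _, rfl⟩
        exact Or.inl hlt)

theorem grid_nodup (h w : Int) (p : Int → Int → Bool) : (grid h w p).Nodup :=
  (grid_pairwise h w p).imp (fun hl he => by
    subst he; rcases hl with hlt | ⟨_, hlt⟩ <;> omega)

-- the inner Python loop over j as filter/map/flatMap appends
theorem inner_foldl (w : Int) (q : Int → Bool) (f g : Int → List Int)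
    (k : Int → List (List Int)) :
    ∀ (a b c : List (List Int)),
    (PySem.List.pyRange 0 w 1).foldl (fun st j =>
        if q j then (st.1 ++ [f j], st.2.1 ++ [g j], st.2.2 ++ k j) else st) (a, b, c)
    = (a ++ ((PySem.List.pyRange 0 w 1).filter q).map f,
       b ++ ((PySem.List.pyRange 0 w 1).filter q).map g,
       c ++ ((PySem.List.pyRange 0 w 1).filter q).flatMap k) := by
  generalize PySem.List.pyRange 0 w 1 = l
  induction l with
  | nil => simp
  | cons x l ih =>
    intro a b c
    by_cases hx : q x = true <;> simp [hx, ih]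

-- the outer Python loop over i, once each step is in append form
theorem outer_foldl (F G : Int → List (List Int)) (K : Int → List (List Int)) (l : List Int) :
    ∀ (a b c : List (List Int)),
    l.foldl (fun st i => (st.1 ++ F i, st.2.1 ++ G i, st.2.2 ++ K i)) (a, b, c)
    = (a ++ l.flatMap F, b ++ l.flatMap G, c ++ l.flatMap K) := by
  induction l with
  | nil => simp
  | cons x l ih => intro a b c; simp [ih]

-- A's double loop computes maps/flatMap over the grid cells
theorem double_foldl (h w : Int) (cond : Int → Int → Bool)
    (u1 u2 : Int → Int → List Int) (k : Int → Int → List (List Int))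
    (a b c : List (List Int)) :
    (PySem.List.pyRange 0 h 1).foldl (fun st i =>
      (PySem.List.pyRange 0 w 1).foldl (fun st j =>
        if cond i j then (st.1 ++ [u1 i j], st.2.1 ++ [u2 i j], st.2.2 ++ k i j) else st) st)
      (a, b, c)
    = (a ++ (grid h w cond).map (fun p => u1 p.1 p.2),
       b ++ (grid h w cond).map (fun p => u2 p.1 p.2),
       c ++ (grid h w cond).flatMap (fun p => k p.1 p.2)) := by
  have hfun : (fun (st : List (List Int) × List (List Int) × List (List Int)) i =>
      (PySem.List.pyRange 0 w 1).foldl (fun st j =>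
        if cond i j then (st.1 ++ [u1 i j], st.2.1 ++ [u2 i j], st.2.2 ++ k i j) else st) st)
      = (fun st i =>
        (st.1 ++ ((PySem.List.pyRange 0 w 1).filter (cond i)).map (u1 i),
         st.2.1 ++ ((PySem.List.pyRange 0 w 1).filter (cond i)).map (u2 i),
         st.2.2 ++ ((PySem.List.pyRange 0 w 1).filter (cond i)).flatMap (k i))) := by
    funext st i
    obtain ⟨x, y, z⟩ := st
    exact inner_foldl w (cond i) (u1 i) (u2 i) (k i) x y z
  rw [hfun, outer_foldl]
  simp [grid, List.map_flatMap, List.flatMap_assoc, List.flatMap_map, List.map_map,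
    Function.comp_def]

-- membership in B's obstacle set is list membership of the 2-cell
theorem mem_altObs (ob : List (List Int)) (a b : Int) :
    (a, b) ∈ altObs ob ↔ [a, b] ∈ ob := by
  simp only [altObs, PySem.Set.mem_ofList, List.mem_map, List.mem_filter, beq_iff_eq]
  constructor
  · rintro ⟨r, ⟨hr, hlen⟩, heq⟩
    rcases r with _ | ⟨x, _ | ⟨y, _ | ⟨z, t⟩⟩⟩ <;> simp_all
  · intro hmem
    exact ⟨[a, b], ⟨hmem, rfl⟩, rfl⟩

theorem altObs_nodup (ob : List (List Int)) : (altObs ob).Nodup :=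
  PySem.Set.nodup_ofList _

theorem contains_altObs_true (ob : List (List Int)) (a b : Int) :
    (altObs ob).contains (a, b) = true ↔ [a, b] ∈ ob := by
  rw [List.contains_iff_mem, mem_altObs]

theorem contains_altObs_false (ob : List (List Int)) (a b : Int) :
    (altObs ob).contains (a, b) = false ↔ [a, b] ∉ ob := by
  rw [← Bool.not_eq_true, contains_altObs_true]

theorem contains_true (l : List (List Int)) (x : List Int) : l.contains x = true ↔ x ∈ l :=
  List.contains_iff_mem

theorem contains_false (l : List (List Int)) (x : List Int) : l.contains x = false ↔ x ∉ l := by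
  rw [← Bool.not_eq_true, List.contains_iff_mem]

-- the vertical matches: B's filtered set is a permutation of A's grid scan
theorem vert_perm (ob : List (List Int)) (h w : Int) :
    ((altObs ob).filter (altCondV h w (altObs ob))).Perm (grid (h - 3) w (aCondV ob)) := by
  refine (List.perm_ext_iff_of_nodup
      ((altObs_nodup ob).filter _) (grid_nodup _ _ _)).mpr ?_
  rintro ⟨a, b⟩
  simp only [List.mem_filter, mem_grid, mem_altObs, altCondV, aCondV,
    Bool.and_eq_true, Bool.not_eq_true', decide_eq_true_eq,
    contains_altObs_true, contains_altObs_false, contains_true, contains_false]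
  tauto

theorem horiz_perm (ob : List (List Int)) (h w : Int) :
    ((altObs ob).filter (altCondH h w (altObs ob))).Perm (grid h (w - 3) (aCondH ob)) := by
  refine (List.perm_ext_iff_of_nodup
      ((altObs_nodup ob).filter _) (grid_nodup _ _ _)).mpr ?_
  rintro ⟨a, b⟩
  simp only [List.mem_filter, mem_grid, mem_altObs, altCondH, aCondH,
    Bool.and_eq_true, Bool.not_eq_true', decide_eq_true_eq,
    contains_altObs_true, contains_altObs_false, contains_true, contains_false]
  tauto

theorem main_eq (map_size : List Int) (obstacle : List (List Int)) :
    narrow_pattern map_size obstacle = narrow_pattern_alt map_size obstacle := by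
  unfold narrow_pattern narrow_pattern_alt
  dsimp only
  rw [double_foldl, double_foldl]
  rw [sorted2_eq_of_perm _ _ ((altObs_nodup obstacle).filter _)
        ((horiz_perm obstacle _ _).symm) (grid_pairwise _ _ _),
      sorted2_eq_of_perm _ _ ((altObs_nodup obstacle).filter _)
        ((vert_perm obstacle _ _).symm) (grid_pairwise _ _ _)]
  simp

-- ===== VERDICT (by name: the statement is the Claim_ definition above) =====
theorem narrow_pattern_spec : Claim_equal_narrow_pattern := by
  intro map_size obstacle _ _
  unfold Spec_narrow_pattern
  exact main_eq map_size obstacle
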